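-- pv_equiv track=rewrite | github.com/onikw/Owner-avatar-Introduction_to_computer_science_course | Zestaw2/z14.py | czybit
-- ===== SOURCE A (Python) =====
-- end=None
--
-- def czybit(maska,ilebit):
--     licz=0
--     while(maska):
--         licz+=maska%2
--         maska//=2
--     end
--     if(licz==ilebit):
--         return True
--     return False
-- ===== SOURCE B (Python) =====
-- def czybit(maska, ilebit):
--     licz = 0
--     while maska:
--         maska &= maska - 1
--         licz += 1
--     return licz == ilebit
-- ===== Notes on version B (the rewrite author's own statement) =====
-- stated objective: alternative
-- what changed: Replaces the shift-and-mod loop over every bit position with Brian Kernighan's bit-clearing loop (maska &= maska - 1), iterating once per set bit instead of once per bit position.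
import Mathlib
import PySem

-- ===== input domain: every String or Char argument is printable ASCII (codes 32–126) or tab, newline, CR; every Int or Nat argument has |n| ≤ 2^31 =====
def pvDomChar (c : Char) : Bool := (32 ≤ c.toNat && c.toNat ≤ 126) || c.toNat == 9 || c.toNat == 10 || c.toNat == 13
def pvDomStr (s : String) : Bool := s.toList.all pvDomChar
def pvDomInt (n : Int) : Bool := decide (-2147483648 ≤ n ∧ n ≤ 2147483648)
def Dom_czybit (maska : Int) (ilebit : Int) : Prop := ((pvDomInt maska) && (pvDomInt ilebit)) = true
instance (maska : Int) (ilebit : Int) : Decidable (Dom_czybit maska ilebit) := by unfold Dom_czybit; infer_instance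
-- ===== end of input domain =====

-- B replaces A's shift-and-mod loop over every bit position with Brian Kernighan's
-- bit-clearing loop (one iteration per set bit); same return value on all maska ≥ 0.
-- On maska < 0 both Python programs loop forever, so Pre_ excludes them.

-- ===== PORT A =====
-- A's while loop: licz += maska % 2; maska //= 2.  Python's loop runs while maska ≠ 0 and
-- never terminates for maska < 0 (excluded by Pre_); the port returns licz there to be total.
def czybitLoopA (maska licz : Int) : Int :=
  if _h : 0 < maska then
    czybitLoopA (PySem.Int.floordiv maska 2) (licz + PySem.Int.mod maska 2)
  else licz
termination_by maska.toNat
decreasing_by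
  rw [PySem.Int.floordiv_eq_ediv_of_pos (by omega)]; omega

def czybit (maska : Int) (ilebit : Int) : Bool :=
  let licz := czybitLoopA maska 0
  if licz == ilebit then true else false

-- ===== PORT B =====
-- B's while loop: maska &= maska - 1; licz += 1.  Python's loop never terminates for
-- maska < 0 (excluded by Pre_); the port returns licz there to be total.
def czybitLoopB (maska licz : Int) : Int :=
  if _h : 0 < maska then
    czybitLoopB (PySem.Int.band maska (maska - 1)) (licz + 1)
  else licz
termination_by maska.toNat
decreasing_by
  rw [PySem.Int.band_of_nonneg (by omega) (by omega)]
  have := Nat.and_le_right (n := maska.toNat) (m := (maska - 1).toNat)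
  omega

def czybit_alt (maska : Int) (ilebit : Int) : Bool :=
  decide (czybitLoopB maska 0 = ilebit)

-- ===== PRECONDITION & SPEC =====
-- Pre_ excludes maska < 0, on which Python A's loop (and Python B's) never terminates.
def Pre_czybit (maska : Int) (ilebit : Int) : Prop := 0 ≤ maska
instance (maska : Int) (ilebit : Int) : Decidable (Pre_czybit maska ilebit) := by unfold Pre_czybit; infer_instance
def pvWitness_czybit : Int × Int := (13, 3)

def Spec_czybit (maska : Int) (ilebit : Int) (out : Bool) : Prop := out = czybit_alt maska ilebit
instance (maska : Int) (ilebit : Int) (out : Bool) : Decidable (Spec_czybit maska ilebit out) := by unfold Spec_czybit; infer_instance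

-- ===== CLAIM (what is proved, stated in full; the proofs are below) =====
def Claim_equal_czybit : Prop := ∀ (maska : Int) (ilebit : Int), Dom_czybit maska ilebit → Pre_czybit maska ilebit → Spec_czybit maska ilebit (czybit maska ilebit)

-- ===== LEMMAS AND PROOFS =====

-- Nat popcount facts, phrased through PySem.Int.bitCount.
theorem pc_two_mul (j : Nat) :
    PySem.Int.bitCount ((2 * j : Nat) : Int) = PySem.Int.bitCount (j : Int) := by
  rcases Nat.eq_zero_or_pos j with hj | hj
  · subst hj; simp
  · rw [PySem.Int.bitCount_natCast (m := 2 * j) (by omega)]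
    have h2 : 2 * j / 2 = j := by omega
    have hm : 2 * j % 2 = 0 := by omega
    rw [h2, hm]; omega

theorem pc_two_mul_add_one (j : Nat) :
    PySem.Int.bitCount ((2 * j + 1 : Nat) : Int) = 1 + PySem.Int.bitCount (j : Int) := by
  rw [PySem.Int.bitCount_natCast (m := 2 * j + 1) (by omega)]
  have h2 : (2 * j + 1) / 2 = j := by omega
  have hm : (2 * j + 1) % 2 = 1 := by omega
  rw [h2, hm]

-- Kernighan's step clears exactly one set bit.
theorem kern_step : ∀ m : Nat, 0 < m →
    PySem.Int.bitCount ((m &&& (m - 1) : Nat) : Int) + 1 = PySem.Int.bitCount (m : Int) := by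
  intro m
  induction m using Nat.strong_induction_on with
  | _ m ih =>
    intro hm
    rcases Nat.even_or_odd m with ⟨k, hk⟩ | ⟨k, hk⟩
    · -- m = 2k, k > 0 : m &&& (m-1) = 2*(k &&& (k-1))
      have hkpos : 0 < k := by omega
      have hland : (2 * k) &&& (2 * (k - 1) + 1) = 2 * (k &&& (k - 1)) := by
        have := Nat.land_bit false k true (k - 1)
        simp [Nat.bit] at this
        omega
      have hm2 : m = 2 * k := by omega
      have hm1 : 2 * k - 1 = 2 * (k - 1) + 1 := by omega
      rw [hm2, hm1, hland, pc_two_mul, pc_two_mul k]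
      exact ih k (by omega) hkpos
    · -- m = 2k+1 : m &&& (m-1) = 2k
      have hland : (2 * k + 1) &&& (2 * k) = 2 * k := by
        have := Nat.land_bit true k false k
        simp [Nat.bit] at this
        omega
      have hm2 : m = 2 * k + 1 := by omega
      have hm1 : 2 * k + 1 - 1 = 2 * k := by omega
      rw [hm2, hm1, hland, pc_two_mul, pc_two_mul_add_one]
      omega

theorem loopA_eq (maska licz : Int) (hge : 0 ≤ maska) :
    czybitLoopA maska licz = licz + (PySem.Int.bitCount maska : Int) := by
  induction maska, licz using czybitLoopA.induct with
  | case1 maska licz h ih =>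
    rw [czybitLoopA, dif_pos h, ih (by
      rw [PySem.Int.floordiv_eq_ediv_of_pos (by omega)]; omega)]
    rw [PySem.Int.bitCount_of_pos (n := maska) h]
    have := PySem.Int.mod_nonneg maska (b := 2) (by omega)
    push_cast
    omega
  | case2 maska licz h =>
    have h0 : maska = 0 := by omega
    rw [czybitLoopA, dif_neg h, h0]
    simp

theorem loopB_eq (maska licz : Int) (hge : 0 ≤ maska) :
    czybitLoopB maska licz = licz + (PySem.Int.bitCount maska : Int) := by
  induction maska, licz using czybitLoopB.induct with
  | case1 maska licz h ih =>
    have hband : PySem.Int.band maska (maska - 1)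
        = ((maska.toNat &&& (maska - 1).toNat : Nat) : Int) :=
      PySem.Int.band_of_nonneg (by omega) (by omega)
    rw [czybitLoopB, dif_pos h, ih (by rw [hband]; positivity)]
    rw [hband]
    have hcast : maska = ((maska.toNat : Nat) : Int) := by omega
    have htn : (maska - 1).toNat = maska.toNat - 1 := by omega
    have := kern_step maska.toNat (by omega)
    rw [htn]
    conv_rhs => rw [hcast]
    omega
  | case2 maska licz h =>
    have h0 : maska = 0 := by omega
    rw [czybitLoopB, dif_neg h, h0]
    simp

-- ===== VERDICT (by name: the statement is the Claim_ definition above) =====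
theorem czybit_spec : Claim_equal_czybit := by
  intro maska ilebit _ hpre
  unfold Spec_czybit czybit czybit_alt
  rw [loopA_eq maska 0 hpre, loopB_eq maska 0 hpre]
  by_cases h : (0 : Int) + (PySem.Int.bitCount maska : Int) = ilebit <;> simp [h]
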